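-- pv_equiv track=rewrite | github.com/imOmesh/kg_imOmesh_2021 | Kargo.py | checkMapping
-- ===== SOURCE A (Python) =====
-- def checkMapping(str_dict_1, str_dict_2):
--     if not str_dict_1 and not str_dict_2:
--         return True
--     # elif not str_dict_1 and str_dict_2:
--     #     return False
--     sorted_dict = sorted(list(str_dict_1.items()), key=lambda x: -x[1])
--     #    sorted_dict2 = sorted(list(str_dict_2.items()),key = lambda x: -x[1])
--     if not sorted_dict:
--         return False
--     lar_occ = sorted_dict[0]
--     get_possible = [(item[1], item[0]) for item in str_dict_2.items() if item[1] >= lar_occ[1]]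
--     if not get_possible:
--         return False
--
--     def getMin(elements):
--         minimum = float('inf')
--         for element in elements:
--             if element[0] < minimum:
--                 out = element
--                 minimum = element[0]
--         return out
--
--     # h.heapify(get_possible )
--     # element = h.heappop(get_possible)
--     element = getMin(get_possible)
--     # for element in get_possible:
--
--     new_str_dict_1 = str_dict_1.copy()
--     del new_str_dict_1[lar_occ[0]]
--     new_str_dict_2 = str_dict_2.copy()
--     new_str_dict_2[element[1]] -= lar_occ[1]
--     if new_str_dict_2[element[1]] == 0:
--         del new_str_dict_2[element[1]]
--     temp = checkMapping(new_str_dict_1, new_str_dict_2)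
--     if temp:
--         return True
--     return False
-- ===== SOURCE B (Python) =====
-- def checkMapping(str_dict_1, str_dict_2):
--     # Keys are irrelevant to the result: work on the two multisets of counts.
--     need = sorted(str_dict_1.values(), reverse=True)   # process largest first, as A does
--     avail = sorted(str_dict_2.values())                # ascending: first element >= c is the minimum >= c
--     for c in need:
--         i = 0
--         n = len(avail)
--         while i < n and avail[i] < c:
--             i += 1
--         if i == n:
--             return False
--         r = avail.pop(i) - c
--         if r != 0:
--             j = 0
--             n = len(avail)
--             while j < n and avail[j] < r:
--                 j += 1
--             avail.insert(j, r)
--     return not avail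
-- ===== Notes on version B (the rewrite author's own statement) =====
-- stated objective: faster
-- what changed: B drops the dicts and the recursion entirely: since keys never influence the result, it sorts the two value multisets once and runs one iterative greedy pass over them with sorted-list scans, where A re-sorts dict_1 and copies both dicts on every recursion step.
import Mathlib
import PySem

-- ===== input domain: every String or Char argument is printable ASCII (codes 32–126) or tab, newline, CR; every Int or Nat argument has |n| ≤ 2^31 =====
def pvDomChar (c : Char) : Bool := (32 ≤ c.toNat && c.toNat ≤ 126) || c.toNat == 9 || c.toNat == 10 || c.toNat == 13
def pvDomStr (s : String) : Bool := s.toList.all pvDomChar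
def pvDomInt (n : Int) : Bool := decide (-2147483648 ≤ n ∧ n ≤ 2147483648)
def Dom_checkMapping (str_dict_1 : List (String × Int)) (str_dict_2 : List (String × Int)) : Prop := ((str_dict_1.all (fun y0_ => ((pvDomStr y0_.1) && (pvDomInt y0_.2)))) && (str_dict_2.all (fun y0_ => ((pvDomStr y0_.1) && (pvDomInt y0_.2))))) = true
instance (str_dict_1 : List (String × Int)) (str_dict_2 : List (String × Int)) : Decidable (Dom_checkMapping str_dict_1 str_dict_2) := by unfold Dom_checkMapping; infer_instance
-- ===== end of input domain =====

-- B replaces A's per-step dict re-sorting and dict copies by two one-time sorts of the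
-- value multisets (keys are irrelevant to the result) and simple sorted-list scans; objective: faster.


-- ===== PORT A =====
-- getMin: `minimum` starts at float('inf'), so the first element is always taken; `none`
-- is Python's unbound `out` on an empty list (unreachable behind A's nonempty guard).
def pvGetMin (elements : List (Int × String)) : Option (Int × String) :=
  elements.foldl (fun st e =>
    match st with
    | none => some e
    | some o => if e.1 < o.1 then some e else some o) none

-- the recursive body of A, on dicts (PySem.Dict = insertion-ordered dict)
def checkMappingGo (d1 d2 : PySem.Dict String Int) : Bool :=
  if d1.items = [] ∧ d2.items = [] then true
  else
    match h : PySem.List.sorted d1.items (fun x => -x.2) with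
    | [] => false
    | lar_occ :: _rest =>
      let get_possible := (d2.items.filter (fun it => lar_occ.2 ≤ it.2)).map (fun it => (it.2, it.1))
      if get_possible = [] then false
      else
        match pvGetMin get_possible with
        | none => false
        | some element =>
          let new_d1 := d1.erase lar_occ.1
          -- d[k] -= v on a key that is present: modify = get then overwrite in place
          let new_d2 := d2.modify element.2 0 (fun v => v - lar_occ.2)
          let new_d2' := if new_d2.getD element.2 0 = 0 then new_d2.erase element.2 else new_d2
          let temp := checkMappingGo new_d1 new_d2'
          if temp then true else false
termination_by d1.items.length
decreasing_by
  have hm : lar_occ ∈ d1.items :=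
    (PySem.List.sorted_perm d1.items (fun x => -x.2) false).subset (h ▸ List.mem_cons_self)
  simp only [PySem.Dict.erase]
  exact List.length_filter_lt_length_iff_exists.mpr ⟨lar_occ, hm, by simp⟩

def checkMapping (str_dict_1 : List (String × Int)) (str_dict_2 : List (String × Int)) : Bool :=
  checkMappingGo ⟨str_dict_1⟩ ⟨str_dict_2⟩

-- ===== PORT B =====
-- `while i < n and avail[i] < c` scan: first element ≥ c, returned with the list without it
def altFindGe (c : Int) : List Int → Option (Int × List Int)
  | [] => none
  | a :: t => if a < c then (altFindGe c t).map (fun p => (p.1, a :: p.2)) else some (a, t)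

-- `while j < n and avail[j] < r` scan + insert: insert before the first element ≥ r
def altInsert (r : Int) : List Int → List Int
  | [] => [r]
  | a :: t => if a < r then a :: altInsert r t else r :: a :: t

-- the `for c in need` loop over the two sorted value lists
def altGo : List Int → List Int → Bool
  | [], avail => avail.isEmpty
  | c :: need, avail =>
    match altFindGe c avail with
    | none => false
    | some (d, rest) =>
      let r := d - c
      altGo need (if r ≠ 0 then altInsert r rest else rest)

def checkMapping_alt (str_dict_1 : List (String × Int)) (str_dict_2 : List (String × Int)) : Bool :=
  altGo (PySem.List.sorted (PySem.Dict.mk str_dict_1).values (fun x => x) true)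
        (PySem.List.sorted (PySem.Dict.mk str_dict_2).values (fun x => x))

-- ===== PRECONDITION & SPEC =====
-- Pre_ excludes association lists with a duplicated key: they are not a faithful rendering of
-- a Python dict (dict construction collapses duplicates), so which value a port reads there is arbitrary.
def Pre_checkMapping (str_dict_1 : List (String × Int)) (str_dict_2 : List (String × Int)) : Prop :=
  (str_dict_1.map Prod.fst).Nodup ∧ (str_dict_2.map Prod.fst).Nodup
instance (str_dict_1 : List (String × Int)) (str_dict_2 : List (String × Int)) : Decidable (Pre_checkMapping str_dict_1 str_dict_2) := by unfold Pre_checkMapping; infer_instance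

def pvWitness_checkMapping : (List (String × Int)) × (List (String × Int)) :=
  ([("a", 2), ("b", 1)], [("c", 3)])

def Spec_checkMapping (str_dict_1 : List (String × Int)) (str_dict_2 : List (String × Int)) (out : Bool) : Prop := out = checkMapping_alt str_dict_1 str_dict_2
instance (str_dict_1 : List (String × Int)) (str_dict_2 : List (String × Int)) (out : Bool) : Decidable (Spec_checkMapping str_dict_1 str_dict_2 out) := by unfold Spec_checkMapping; infer_instance

-- ===== CLAIM (what is proved, stated in full; the proofs are below) =====
def Claim_equal_checkMapping : Prop := ∀ (str_dict_1 : List (String × Int)) (str_dict_2 : List (String × Int)), Dom_checkMapping str_dict_1 str_dict_2 → Pre_checkMapping str_dict_1 str_dict_2 → Spec_checkMapping str_dict_1 str_dict_2 (checkMapping str_dict_1 str_dict_2)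

-- ===== LEMMAS AND PROOFS =====

-- getMin returns some exactly on nonempty input, and then a minimal member
theorem pvGetMin_aux (l : List (Int × String)) (o : Int × String) :
    ∃ m, l.foldl (fun st e =>
      match st with
      | none => some e
      | some o => if e.1 < o.1 then some e else some o) (some o) = some m ∧
      (m = o ∨ m ∈ l) ∧ m.1 ≤ o.1 ∧ ∀ x ∈ l, m.1 ≤ x.1 := by
  induction l generalizing o with
  | nil => exact ⟨o, rfl, Or.inl rfl, le_refl _, by simp⟩
  | cons e t ih =>
    obtain ⟨m, hf, hmem, hle, hall⟩ := ih (if e.1 < o.1 then e else o)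
    refine ⟨m, ?_, ?_, ?_, ?_⟩
    · simpa [← apply_ite some] using hf
    · rcases hmem with h | h
      · subst h; split_ifs at * <;> simp_all
      · exact Or.inr (List.mem_cons_of_mem _ h)
    · split_ifs at hle with h <;> omega
    · intro x hx
      rcases List.mem_cons.mp hx with rfl | hx
      · split_ifs at hle with h <;> omega
      · exact hall x hx

theorem pvGetMin_spec (l : List (Int × String)) (hl : l ≠ []) :
    ∃ m, pvGetMin l = some m ∧ m ∈ l ∧ ∀ x ∈ l, m.1 ≤ x.1 := by
  cases l with
  | nil => exact absurd rfl hl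
  | cons e t =>
    obtain ⟨m, hf, hmem, hle, hall⟩ := pvGetMin_aux t e
    refine ⟨m, by simpa [pvGetMin] using hf, ?_, ?_⟩
    · rcases hmem with rfl | h
      · exact List.mem_cons_self
      · exact List.mem_cons_of_mem _ h
    · intro x hx
      rcases List.mem_cons.mp hx with rfl | hx
      · exact hle
      · exact hall x hx

-- altFindGe on a sorted list: none iff everything is < c
theorem altFindGe_none_iff (c : Int) (l : List Int) :
    altFindGe c l = none ↔ ∀ x ∈ l, x < c := by
  induction l with
  | nil => simp [altFindGe]
  | cons a t ih =>
    by_cases h : a < c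
    · simp [altFindGe, h, Option.map_eq_none_iff, ih]
    · rw [altFindGe, if_neg h]
      simp only [reduceCtorEq, false_iff]
      intro hall
      exact h (hall a List.mem_cons_self)

-- altFindGe on a sorted list: some (d, rest) gives the minimum element ≥ c, rest its sorted complement
theorem altFindGe_some_spec (c : Int) (l : List Int) (hs : l.Pairwise (· ≤ ·))
    (d : Int) (rest : List Int) (hf : altFindGe c l = some (d, rest)) :
    d ∈ l ∧ c ≤ d ∧ (∀ x ∈ l, c ≤ x → d ≤ x) ∧ l.Perm (d :: rest) ∧ rest.Pairwise (· ≤ ·) := by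
  induction l generalizing rest with
  | nil => simp [altFindGe] at hf
  | cons a t ih =>
    obtain ⟨ha, ht⟩ := List.pairwise_cons.mp hs
    by_cases h : a < c
    · simp only [altFindGe, if_pos h, Option.map_eq_some_iff] at hf
      obtain ⟨⟨d', rest'⟩, hf', heq⟩ := hf
      simp only [Prod.mk.injEq] at heq
      obtain ⟨rfl, rfl⟩ := heq
      obtain ⟨hd1, hd2, hd3, hd4, hd5⟩ := ih ht _ hf'
      refine ⟨List.mem_cons_of_mem _ hd1, hd2, ?_, ?_, ?_⟩
      · intro x hx hcx
        rcases List.mem_cons.mp hx with rfl | hx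
        · omega
        · exact hd3 x hx hcx
      · exact ((hd4.cons a).trans (List.Perm.swap _ _ _))
      · refine List.pairwise_cons.mpr ⟨?_, hd5⟩
        intro x hx
        exact ha x (hd4.symm.subset (List.mem_cons_of_mem _ hx))
    · simp only [altFindGe, if_neg h] at hf
      simp only [Option.some.injEq, Prod.mk.injEq] at hf
      obtain ⟨rfl, rfl⟩ := hf
      exact ⟨List.mem_cons_self, by omega, fun x hx _ => by
        rcases List.mem_cons.mp hx with rfl | hx
        · exact le_refl _
        · exact ha x hx, List.Perm.refl _, ht⟩

theorem altInsert_perm (r : Int) (l : List Int) : (altInsert r l).Perm (r :: l) := by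
  induction l with
  | nil => simp [altInsert]
  | cons a t ih =>
    by_cases h : a < r
    · simpa [altInsert, h] using ((ih.cons a).trans (List.Perm.swap _ _ _))
    · simp [altInsert, h]

theorem altInsert_pairwise (r : Int) (l : List Int) (hs : l.Pairwise (· ≤ ·)) :
    (altInsert r l).Pairwise (· ≤ ·) := by
  induction l with
  | nil => simp [altInsert]
  | cons a t ih =>
    obtain ⟨ha, ht⟩ := List.pairwise_cons.mp hs
    by_cases h : a < r
    · rw [altInsert, if_pos h]
      refine List.pairwise_cons.mpr ⟨?_, ih ht⟩
      intro x hx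
      rcases List.mem_cons.mp ((altInsert_perm r t).subset hx) with rfl | h'
      · omega
      · exact ha x h'
    · rw [altInsert, if_neg h]
      refine List.pairwise_cons.mpr ⟨?_, hs⟩
      intro x hx
      rcases List.mem_cons.mp hx with rfl | hx
      · omega
      · have := ha x hx; omega

-- descending-sort uniqueness, via the injective key (-·)
theorem sorted_desc_unique (xs ys : List Int) (hp : ys.Perm xs)
    (hpw : ys.Pairwise (fun a b => b ≤ a)) :
    PySem.List.sorted xs (fun x => x) true = ys := by
  refine PySem.List.eq_of_perm_of_pairwise_le_of_injective (fun v : Int => -v) neg_injective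
    ((PySem.List.sorted_perm xs (fun x => x) true).trans hp.symm) ?_ ?_
  · have := PySem.List.sorted_pairwise_rev xs (fun x : Int => x)
    refine this.imp ?_
    intro a b h
    simp only at h ⊢
    omega
  · refine hpw.imp ?_
    intro a b h
    simp only at h ⊢
    omega

-- values of an association list after deleting the (unique) entry for key p.1
theorem vals_erase_perm (l : List (String × Int)) (p : String × Int)
    (hnd : (l.map Prod.fst).Nodup) (hm : p ∈ l) :
    (l.map Prod.snd).Perm (p.2 :: ((l.filter (fun q => !(q.1 == p.1))).map Prod.snd)) := by
  induction l with
  | nil => simp at hm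
  | cons q t ih =>
    simp only [List.map_cons, List.nodup_cons] at hnd
    obtain ⟨hq, hnt⟩ := hnd
    rcases List.mem_cons.mp hm with rfl | hm
    · have hfilt : t.filter (fun q' => !(q'.1 == p.1)) = t := by
        refine List.filter_eq_self.mpr ?_
        intro x hx
        simp only [Bool.not_eq_eq_eq_not, Bool.not_true, beq_eq_false_iff_ne, ne_eq]
        intro hxp
        exact hq (hxp ▸ List.mem_map_of_mem hx)
      simp [hfilt]
    · have hne : q.1 ≠ p.1 := by
        intro hqp
        exact hq (hqp ▸ List.mem_map_of_mem hm)
      have := (ih hnt hm).cons q.2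
      simp only [List.filter_cons, show (!(q.1 == p.1)) = true by simpa using hne, List.map_cons]
      exact this.trans (List.Perm.swap _ _ _)

-- filtering key k away ignores the update at key k
theorem filter_update (l : List (String × Int)) (k : String) (w : Int) :
    (l.map (fun p => if p.1 == k then (k, w) else p)).filter (fun q => !(q.1 == k))
      = l.filter (fun q => !(q.1 == k)) := by
  induction l with
  | nil => rfl
  | cons q t ih =>
    by_cases h : (q.1 == k) = true
    · rw [List.map_cons, if_pos h, List.filter_cons, List.filter_cons]
      simp only [h, beq_self_eq_true, Bool.not_true]
      exact ih
    · rw [List.map_cons, if_neg h, List.filter_cons, List.filter_cons]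
      simp only [Bool.not_eq_true] at h
      simp only [h, Bool.not_false, if_true]
      rw [ih]

-- replacing the value at the (unique) entry for key k
theorem vals_update_perm (l : List (String × Int)) (k : String) (v w : Int)
    (hnd : (l.map Prod.fst).Nodup) (hm : (k, v) ∈ l) :
    ((l.map (fun p => if p.1 == k then (k, w) else p)).map Prod.snd).Perm
      (w :: ((l.filter (fun q => !(q.1 == k))).map Prod.snd)) := by
  have hm' : (k, w) ∈ l.map (fun p => if p.1 == k then (k, w) else p) := by
    refine List.mem_map.mpr ⟨(k, v), hm, by simp⟩
  have hkeys : ((l.map (fun p => if p.1 == k then (k, w) else p)).map Prod.fst) = l.map Prod.fst := by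
    rw [List.map_map]
    refine List.map_congr_left ?_
    intro p _
    by_cases h : p.1 = k <;> simp [h]
  have hfilt := filter_update l k w
  have := vals_erase_perm (l.map (fun p => if p.1 == k then (k, w) else p)) (k, w)
    (by rw [hkeys]; exact hnd) hm'
  rw [hfilt] at this
  exact this

-- first-match lookup in a nodup association list
theorem find_nodup (l : List (String × Int)) (k : String) (v : Int)
    (hnd : (l.map Prod.fst).Nodup) (hm : (k, v) ∈ l) :
    l.find? (fun p => p.1 == k) = some (k, v) := by
  induction l with
  | nil => simp at hm
  | cons q t ih =>
    simp only [List.map_cons, List.nodup_cons] at hnd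
    obtain ⟨hq, hnt⟩ := hnd
    rcases List.mem_cons.mp hm with rfl | hm
    · simp
    · have hne : q.1 ≠ k := by
        intro hqp
        exact hq (hqp ▸ List.mem_map_of_mem hm)
      simp only [List.find?_cons, show (q.1 == k) = false by simpa using hne]
      exact ih hnt hm

-- keys are untouched by the value update at key k
theorem keys_update (l : List (String × Int)) (k : String) (w : Int) :
    (l.map (fun p => if p.1 == k then (k, w) else p)).map Prod.fst = l.map Prod.fst := by
  rw [List.map_map]
  refine List.map_congr_left ?_
  intro p _
  by_cases h : p.1 = k <;> simp [h]

-- keys of a key-filtered association list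
theorem keys_filter (l : List (String × Int)) (k : String) :
    (l.filter (fun q => !(q.1 == k))).map Prod.fst
      = (l.map Prod.fst).filter (fun x => !(x == k)) := by
  induction l with
  | nil => rfl
  | cons q t ih =>
    simp only [List.filter_cons, List.map_cons]
    by_cases h : q.1 = k <;> simp [h, ih]

-- the base case: dict_1 empty
theorem go_eq_nil (d1 d2 : PySem.Dict String Int) (hd1 : d1.items = []) :
    checkMappingGo d1 d2 =
      altGo (PySem.List.sorted d1.values (fun x => x) true)
            (PySem.List.sorted d2.values (fun x => x)) := by
  have hv : d1.values = [] := by simp [PySem.Dict.values, hd1]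
  have hsorted : PySem.List.sorted d1.items (fun x => -x.2) = [] :=
    (PySem.List.sorted_eq_nil_iff _ _ _).mpr hd1
  have hdesc : PySem.List.sorted d1.values (fun x => x) true = [] :=
    (PySem.List.sorted_eq_nil_iff _ _ _).mpr hv
  rw [checkMappingGo.eq_def, hdesc]
  by_cases hd2 : d2.items = []
  · have hv2 : PySem.List.sorted d2.values (fun x => x) = [] :=
      (PySem.List.sorted_eq_nil_iff _ _ _).mpr (by simp [PySem.Dict.values, hd2])
    rw [if_pos ⟨hd1, hd2⟩, hv2]
    rfl
  · have hv2 : PySem.List.sorted d2.values (fun x => x) ≠ [] := fun hc =>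
      hd2 (by simpa [PySem.Dict.values] using (PySem.List.sorted_eq_nil_iff _ _ _).mp hc)
    rw [if_neg (fun hc => hd2 hc.2)]
    split
    · simp [altGo, hv2]
    · rename_i lar _ heq
      rw [hsorted] at heq
      exact absurd heq (List.cons_ne_nil _ _).symm

-- the main step-by-step equivalence, by strong induction on the size of dict_1
theorem go_eq (n : Nat) (d1 d2 : PySem.Dict String Int) (hn : d1.items.length ≤ n)
    (h1 : (d1.items.map Prod.fst).Nodup) (h2 : (d2.items.map Prod.fst).Nodup) :
    checkMappingGo d1 d2 =
      altGo (PySem.List.sorted d1.values (fun x => x) true)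
            (PySem.List.sorted d2.values (fun x => x)) := by
  induction n generalizing d1 d2 with
  | zero => exact go_eq_nil d1 d2 (List.length_eq_zero_iff.mp (Nat.le_zero.mp hn))
  | succ n ih =>
    by_cases hd1 : d1.items = []
    · exact go_eq_nil d1 d2 hd1
    · rw [checkMappingGo.eq_def, if_neg (fun hc => hd1 hc.1)]
      split
      · rename_i heq
        exact absurd ((PySem.List.sorted_eq_nil_iff _ _ _).mp heq) hd1
      · rename_i lar_occ _rest heq
        have hm : lar_occ ∈ d1.items :=
          (PySem.List.sorted_perm d1.items (fun x => -x.2) false).subset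
            (heq ▸ List.mem_cons_self)
        have hmax : ∀ y ∈ d1.items, y.2 ≤ lar_occ.2 := by
          intro y hy
          have := PySem.List.key_head_sorted_le d1.items (fun x => -x.2) heq y hy
          simp only at this
          omega
        -- descending decomposition of dict_1's sorted values
        have hdesc : PySem.List.sorted d1.values (fun x => x) true
            = lar_occ.2 :: PySem.List.sorted
                ((d1.items.filter (fun q => !(q.1 == lar_occ.1))).map Prod.snd) (fun x => x) true := by
          apply sorted_desc_unique
          · exact ((PySem.List.sorted_perm _ _ _).cons lar_occ.2).trans
              (vals_erase_perm d1.items lar_occ h1 hm).symm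
          · refine List.pairwise_cons.mpr ⟨?_, ?_⟩
            · intro x hx
              obtain ⟨q, hq, rfl⟩ :=
                List.mem_map.mp ((PySem.List.sorted_perm _ _ _).subset hx)
              exact hmax q (List.mem_of_mem_filter hq)
            · have := PySem.List.sorted_pairwise_rev
                ((d1.items.filter (fun q => !(q.1 == lar_occ.1))).map Prod.snd) (fun x : Int => x)
              exact this
        rw [hdesc, altGo]
        have availPerm : (PySem.List.sorted d2.values (fun x => x)).Perm d2.values :=
          PySem.List.sorted_perm _ _ _
        have availPw : (PySem.List.sorted d2.values (fun x => x)).Pairwise (· ≤ ·) :=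
          PySem.List.sorted_pairwise d2.values (fun x : Int => x)
        by_cases hgpe : (d2.items.filter (fun it => decide (lar_occ.2 ≤ it.2))).map
            (fun it => (it.2, it.1)) = []
        · -- nothing in dict_2 is ≥ the largest count: both sides return false
          have hall : ∀ x ∈ PySem.List.sorted d2.values (fun x => x), x < lar_occ.2 := by
            intro x hx
            obtain ⟨q, hq, rfl⟩ := List.mem_map.mp (availPerm.subset hx)
            by_contra hge
            have h1' : q ∈ d2.items.filter (fun it => decide (lar_occ.2 ≤ it.2)) :=
              List.mem_filter.mpr ⟨hq, by simp; omega⟩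
            have h2' : (q.2, q.1) ∈ (d2.items.filter (fun it => decide (lar_occ.2 ≤ it.2))).map
                (fun it => (it.2, it.1)) := List.mem_map_of_mem h1'
            rw [hgpe] at h2'
            exact absurd h2' (List.not_mem_nil)
          rw [if_pos hgpe, (altFindGe_none_iff _ _).mpr hall]
        · rw [if_neg hgpe]
          obtain ⟨element, hel, helm, helmin⟩ := pvGetMin_spec _ hgpe
          rw [hel]
          obtain ⟨q, hqf, hqe⟩ := List.mem_map.mp helm
          have hq2 : q ∈ d2.items := List.mem_of_mem_filter hqf
          have hqc : lar_occ.2 ≤ q.2 := by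
            have := List.of_mem_filter hqf
            simpa using this
          have hqv : q.2 ∈ PySem.List.sorted d2.values (fun x => x) :=
            availPerm.mem_iff.mpr (List.mem_map_of_mem hq2)
          cases hfind : altFindGe lar_occ.2 (PySem.List.sorted d2.values (fun x => x)) with
          | none =>
            exact absurd ((altFindGe_none_iff _ _).mp hfind q.2 hqv) (by omega)
          | some pr =>
            obtain ⟨dv, rest⟩ := pr
            obtain ⟨hdm, hdc, hdmin, hdperm, hdpw⟩ :=
              altFindGe_some_spec _ _ availPw dv rest hfind
            subst hqe
            -- the value A picks equals the value B picks
            have hvdv : q.2 = dv := by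
              apply le_antisymm
              · obtain ⟨qq, hqq, rfl⟩ := List.mem_map.mp (availPerm.subset hdm)
                have : (qq.2, qq.1) ∈ (d2.items.filter (fun it => decide (lar_occ.2 ≤ it.2))).map
                    (fun it => (it.2, it.1)) :=
                  List.mem_map_of_mem (List.mem_filter.mpr ⟨hqq, by simp; omega⟩)
                simpa using helmin _ this
              · exact hdmin q.2 hqv hqc
            subst hvdv
            dsimp only
            have hqp : (q.1, q.2) ∈ d2.items := by simpa using hq2
            have hcont : d2.contains q.1 = true := by
              simp only [PySem.Dict.contains, List.any_eq_true]
              exact ⟨q, hq2, by simp⟩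
            have hgetD2 : d2.getD q.1 0 = q.2 := by
              simp only [PySem.Dict.getD, PySem.Dict.get?]
              rw [find_nodup _ _ _ h2 hqp]
              rfl
            have hM : (d2.modify q.1 0 (fun v => v - lar_occ.2)).items
                = d2.items.map (fun p => if p.1 == q.1 then (q.1, q.2 - lar_occ.2) else p) := by
              simp only [PySem.Dict.modify, hgetD2]
              exact PySem.Dict.items_insert_of_contains d2 _ hcont
            have hMnd : ((d2.modify q.1 0 (fun v => v - lar_occ.2)).items.map Prod.fst).Nodup := by
              rw [hM, keys_update]
              exact h2
            have hmemM : (q.1, q.2 - lar_occ.2) ∈ (d2.modify q.1 0 (fun v => v - lar_occ.2)).items := by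
              rw [hM]
              exact List.mem_map.mpr ⟨(q.1, q.2), hqp, by simp⟩
            have hgetM : (d2.modify q.1 0 (fun v => v - lar_occ.2)).getD q.1 0 = q.2 - lar_occ.2 := by
              simp only [PySem.Dict.getD, PySem.Dict.get?]
              rw [find_nodup _ _ _ hMnd hmemM]
              rfl
            -- the remaining values of dict_2 after removing q's entry
            have hrestPerm : rest.Perm ((d2.items.filter (fun p => !(p.1 == q.1))).map Prod.snd) :=
              ((hdperm.symm.trans availPerm).trans (vals_erase_perm d2.items (q.1, q.2) h2 hqp)).cons_inv
            -- the new dict_1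
            have hnd1 : ((d1.erase lar_occ.1).items.map Prod.fst).Nodup := by
              simp only [PySem.Dict.erase]
              rw [keys_filter]
              exact h1.filter _
            have hlen1 : (d1.erase lar_occ.1).items.length ≤ n := by
              simp only [PySem.Dict.erase]
              have : (d1.items.filter (fun p => !(p.1 == lar_occ.1))).length < d1.items.length :=
                List.length_filter_lt_length_iff_exists.mpr ⟨lar_occ, hm, by simp⟩
              omega
            have hvals1 : (d1.erase lar_occ.1).values
                = (d1.items.filter (fun q => !(q.1 == lar_occ.1))).map Prod.snd := by
              simp only [PySem.Dict.erase, PySem.Dict.values]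
            rw [hgetM]
            by_cases hz : q.2 - lar_occ.2 = 0
            · rw [if_pos hz, if_neg (by omega : ¬ (q.2 - lar_occ.2 ≠ 0))]
              have hnd2' : (((d2.modify q.1 0 (fun v => v - lar_occ.2)).erase q.1).items.map Prod.fst).Nodup := by
                simp only [PySem.Dict.erase]
                rw [keys_filter]
                exact hMnd.filter _
              have hvals2' : PySem.List.sorted ((d2.modify q.1 0 (fun v => v - lar_occ.2)).erase q.1).values
                  (fun x => x) = rest := by
                apply PySem.List.sorted_id_eq_of_perm_of_pairwise _ _ _ hdpw
                simp only [PySem.Dict.erase, PySem.Dict.values, hM, filter_update]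
                exact hrestPerm
              rw [ih _ _ (by simpa using hlen1) hnd1 hnd2', hvals1, hvals2']
              cases altGo (PySem.List.sorted ((d1.items.filter (fun q => !(q.1 == lar_occ.1))).map Prod.snd)
                (fun x => x) true) rest <;> simp
            · rw [if_neg hz, if_pos hz]
              have hvals2' : PySem.List.sorted (d2.modify q.1 0 (fun v => v - lar_occ.2)).values
                  (fun x => x) = altInsert (q.2 - lar_occ.2) rest := by
                apply PySem.List.sorted_id_eq_of_perm_of_pairwise _ _ _
                  (altInsert_pairwise _ _ hdpw)
                refine (altInsert_perm _ _).trans ?_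
                refine (hrestPerm.cons _).trans ?_
                have := vals_update_perm d2.items q.1 q.2 (q.2 - lar_occ.2) h2 hqp
                simp only [PySem.Dict.values, hM]
                exact this.symm
              rw [ih _ _ (by simpa using hlen1) hnd1 (by rw [hM, keys_update] at *; exact h2),
                hvals1, hvals2']
              cases altGo (PySem.List.sorted ((d1.items.filter (fun q => !(q.1 == lar_occ.1))).map Prod.snd)
                (fun x => x) true) (altInsert (q.2 - lar_occ.2) rest) <;> simp
  

-- ===== VERDICT (by name: the statement is the Claim_ definition above) =====
theorem checkMapping_spec : Claim_equal_checkMapping := by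
  intro l1 l2 _hdom hpre
  unfold Spec_checkMapping checkMapping checkMapping_alt
  exact go_eq l1.length ⟨l1⟩ ⟨l2⟩ (le_refl _) hpre.1 hpre.2
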